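-- pv_equiv track=rewrite | github.com/LeChevreuil/project-quoridor | quoridor.py | formater_damier
-- ===== SOURCE A (Python) =====
-- def formater_damier(joueurs, murs):
--     padding = 3
--     lignes = ["   " + "-" * padding * 9]
--
--     # construire le damier
--     for y in range(9, 0, -1):
--         temp = str(y) + " |"
--         for x in range(1, 10):
--
--             # verifier si c'est un joueur
--             numJoueur = 1
--             joueurPlace = False
--             for joueur in joueurs:
--                 if x == joueur["pos"][0] and y == joueur["pos"][1]:
--                     temp += " " + str(numJoueur) + " "
--                     joueurPlace = True
--                 numJoueur += 1
--
--             # sinon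
--             if not joueurPlace:
--                 temp += " . "
--
--         temp += "|" + ""
--         lignes.append(temp)
--
--         # verifier murs horizontaux
--         ligne = "  |" + (" " * 3 * 9) + "|"
--
--         lignes.append(ligne)
--
--     resulat = "\n".join(lignes) + "\n"
--     resulat += "--|" + "-" * padding * 9 + "\n"
--     resulat += "  |"
--
--     for i in range(1, 10):
--         resulat += " " + str(i) + " "
--
--     resulat += "\n"
--     return resulat
-- ===== SOURCE B (Python) =====
-- def formater_damier(joueurs, murs):
--     # Index each occupied cell once, then render every cell by dict lookup
--     # instead of rescanning the whole player list for each of the 81 cells.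
--     pairs = []
--     n = 1
--     for j in joueurs:
--         pairs.append(((j["pos"][0], j["pos"][1]), n))
--         n += 1
--     index = {}
--     for key, num in pairs:
--         index[key] = index.get(key, []) + [num]
--
--     dashes = "-" * 27
--     spacer = "  |" + " " * 27 + "|"
--
--     def cell(x, y):
--         ns = index.get((x, y), [])
--         if not ns:
--             return " . "
--         return "".join(" " + str(k) + " " for k in ns)
--
--     def row(y):
--         cells = "".join(cell(x, y) for x in range(1, 10))
--         return str(y) + " |" + cells + "|"
--
--     lignes = (["   " + dashes]
--               + [l for y in range(9, 0, -1) for l in (row(y), spacer)]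
--               + ["--|" + dashes,
--                  "  |" + "".join(" " + str(i) + " " for i in range(1, 10))])
--     return "\n".join(lignes) + "\n"
-- ===== Notes on version B (the rewrite author's own statement) =====
-- stated objective: alternative
-- what changed: B builds a dict from each occupied (x,y) cell to the 1-based numbers of the players there in one pass and renders every cell by lookup (avoiding A's rescan of the whole player list for each of the 81 cells); rows are assembled by comprehension/join instead of string accumulation.
import Mathlib
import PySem

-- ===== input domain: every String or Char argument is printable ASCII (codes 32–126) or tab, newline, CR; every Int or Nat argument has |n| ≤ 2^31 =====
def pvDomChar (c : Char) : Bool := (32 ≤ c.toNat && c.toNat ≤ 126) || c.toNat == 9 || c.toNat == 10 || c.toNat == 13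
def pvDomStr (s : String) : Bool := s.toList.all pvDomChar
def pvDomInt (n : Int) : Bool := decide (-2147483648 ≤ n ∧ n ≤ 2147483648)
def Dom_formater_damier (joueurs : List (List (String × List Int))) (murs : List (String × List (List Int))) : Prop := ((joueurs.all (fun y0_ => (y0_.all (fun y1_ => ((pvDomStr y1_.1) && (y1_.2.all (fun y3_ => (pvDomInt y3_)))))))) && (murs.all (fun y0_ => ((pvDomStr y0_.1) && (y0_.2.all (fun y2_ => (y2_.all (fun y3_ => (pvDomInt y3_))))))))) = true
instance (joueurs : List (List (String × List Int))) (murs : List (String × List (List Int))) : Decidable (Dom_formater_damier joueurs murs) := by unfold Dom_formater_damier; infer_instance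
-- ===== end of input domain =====

-- B replaces A's per-cell scan of the whole player list by a dict built once
-- (cell position -> player numbers) and join-based row assembly; same text.

-- ===== PORT A =====
def formater_damier (joueurs : List (List (String × List Int))) (murs : List (String × List (List Int))) : String :=
  -- padding = 3; "-" * padding * 9 and " " * 3 * 9 are written as their literal values
  let lignes : List String := ["   " ++ "---------------------------"]
  let lignes := (PySem.List.pyRange 9 0 (-1)).foldl (fun lignes y =>
    let temp := PySem.Int.toStr y ++ " |"
    let temp := (PySem.List.pyRange 1 10).foldl (fun temp x =>
      let st := joueurs.foldl (fun (st : String × Int × Bool) joueur =>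
        let pos := (PySem.Dict.mk joueur).getD "pos" []   -- joueur["pos"]; Pre_ excludes a missing or short "pos"
        if x == PySem.List.pyGetD pos 0 0 && y == PySem.List.pyGetD pos 1 0 then
          (st.1 ++ " " ++ PySem.Int.toStr st.2.1 ++ " ", st.2.1 + 1, true)
        else (st.1, st.2.1 + 1, st.2.2)) (temp, (1 : Int), false)
      if !st.2.2 then st.1 ++ " . " else st.1) temp
    let temp := temp ++ "|" ++ ""
    let lignes := lignes ++ [temp]
    lignes ++ ["  |" ++ "                           " ++ "|"]) lignes
  let resulat := PySem.Str.join "\n" lignes ++ "\n"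
  let resulat := resulat ++ "--|" ++ "---------------------------" ++ "\n"
  let resulat := resulat ++ "  |"
  let resulat := (PySem.List.pyRange 1 10).foldl (fun resulat i => resulat ++ " " ++ PySem.Int.toStr i ++ " ") resulat
  resulat ++ "\n"

-- ===== PORT B =====
-- pairs: ((pos[0], pos[1]), player number) for each player, numbers from 1
def pvPairs (joueurs : List (List (String × List Int))) (n : Int) : List ((Int × Int) × Int) :=
  match joueurs with
  | [] => []
  | j :: rest =>
      let pos := (PySem.Dict.mk j).getD "pos" []   -- j["pos"]; Pre_ excludes a missing or short "pos"
      ((PySem.List.pyGetD pos 0 0, PySem.List.pyGetD pos 1 0), n) :: pvPairs rest (n + 1)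

def pvIndex (joueurs : List (List (String × List Int))) : PySem.Dict (Int × Int) (List Int) :=
  (pvPairs joueurs 1).foldl (fun d p => d.modify p.1 [] (· ++ [p.2])) PySem.Dict.empty

def pvDashes : String := "---------------------------"

def pvSpacer : String := "  |" ++ "                           " ++ "|"

def pvCell (joueurs : List (List (String × List Int))) (x y : Int) : String :=
  let ns := (pvIndex joueurs).getD (x, y) []
  if ns.isEmpty then " . "
  else PySem.Str.join "" (ns.map (fun k => " " ++ PySem.Int.toStr k ++ " "))

def pvRow (joueurs : List (List (String × List Int))) (y : Int) : String :=
  PySem.Int.toStr y ++ " |" ++ PySem.Str.join "" ((PySem.List.pyRange 1 10).map (fun x => pvCell joueurs x y)) ++ "|"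

def formater_damier_alt (joueurs : List (List (String × List Int))) (murs : List (String × List (List Int))) : String :=
  let lignes := ["   " ++ pvDashes]
      ++ (PySem.List.pyRange 9 0 (-1)).flatMap (fun y => [pvRow joueurs y, pvSpacer])
      ++ ["--|" ++ pvDashes,
          "  |" ++ PySem.Str.join "" ((PySem.List.pyRange 1 10).map (fun i => " " ++ PySem.Int.toStr i ++ " "))]
  PySem.Str.join "\n" lignes ++ "\n"

-- ===== PRECONDITION & SPEC =====
-- Pre_ excludes players whose dict has no "pos" key or whose "pos" list has fewer
-- than 2 entries: there A raises KeyError/IndexError — except that with a one-element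
-- "pos" whose value lies outside columns 1..9 A's short-circuiting `and` happens to
-- return a board, while B (which always reads pos[1]) raises IndexError there.
def Pre_formater_damier (joueurs : List (List (String × List Int))) (murs : List (String × List (List Int))) : Prop :=
  ∀ j ∈ joueurs, 2 ≤ ((PySem.Dict.mk j).getD "pos" []).length
instance (joueurs : List (List (String × List Int))) (murs : List (String × List (List Int))) : Decidable (Pre_formater_damier joueurs murs) := by unfold Pre_formater_damier; infer_instance

def pvWitness_formater_damier : (List (List (String × List Int))) × (List (String × List (List Int))) :=
  ([[("pos", [5, 5])], [("pos", [1, 9])]], [])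

def Spec_formater_damier (joueurs : List (List (String × List Int))) (murs : List (String × List (List Int))) (out : String) : Prop := out = formater_damier_alt joueurs murs
instance (joueurs : List (List (String × List Int))) (murs : List (String × List (List Int))) (out : String) : Decidable (Spec_formater_damier joueurs murs out) := by unfold Spec_formater_damier; infer_instance

-- ===== CLAIM (what is proved, stated in full; the proofs are below) =====
def Claim_equal_formater_damier : Prop := ∀ (joueurs : List (List (String × List Int))) (murs : List (String × List (List Int))), Dom_formater_damier joueurs murs → Pre_formater_damier joueurs murs → Spec_formater_damier joueurs murs (formater_damier joueurs murs)

-- ===== LEMMAS AND PROOFS =====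

-- "".join on a cons
lemma pvJoin0_cons (a : String) (l : List String) :
    PySem.Str.join "" (a :: l) = a ++ PySem.Str.join "" l := by
  cases l with
  | nil => simp [PySem.Str.join, PySem.Chars.join_singleton, PySem.Chars.join_nil,
      String.ofList_toList]
  | cons b t => simp [PySem.Str.join, PySem.Chars.join_cons_cons, String.ofList_append,
      String.ofList_toList]

lemma pvOfList_nl (l : List Char) : String.ofList ('\n' :: l) = "\n" ++ String.ofList l := by
  rw [show ('\n' :: l) = "\n".toList ++ l from rfl, String.ofList_append, String.ofList_toList]

-- "\n".join over a nonempty list with one element appended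
lemma pvJoinNL_append (x a : String) (l : List String) :
    PySem.Str.join "\n" ((x :: l) ++ [a]) = PySem.Str.join "\n" (x :: l) ++ "\n" ++ a := by
  induction l generalizing x with
  | nil => simp [PySem.Str.join, PySem.Chars.join_cons_cons, PySem.Chars.join_singleton,
      String.ofList_append, String.ofList_toList, pvOfList_nl, String.append_assoc]
  | cons b t ih =>
      have h1 : PySem.Str.join "\n" ((x :: b :: t) ++ [a])
          = x ++ "\n" ++ PySem.Str.join "\n" ((b :: t) ++ [a]) := by
        simp [PySem.Str.join, PySem.Chars.join_cons_cons, String.ofList_append,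
          String.ofList_toList, pvOfList_nl, String.append_assoc]
      have h2 : PySem.Str.join "\n" (x :: b :: t)
          = x ++ "\n" ++ PySem.Str.join "\n" (b :: t) := by
        simp [PySem.Str.join, PySem.Chars.join_cons_cons, String.ofList_append,
          String.ofList_toList, pvOfList_nl, String.append_assoc]
      rw [h1, ih, h2]
      simp [String.append_assoc]

-- a fold appending f a each step is the accumulator followed by "".join of the map
lemma pvFoldl_join {α : Type} (f : α → String) (l : List α) (t : String) :
    l.foldl (fun s a => s ++ f a) t = t ++ PySem.Str.join "" (l.map f) := by
  induction l generalizing t with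
  | nil => simp [PySem.Str.join, PySem.Chars.join_nil]
  | cons a r ih => simp [List.foldl_cons, ih, pvJoin0_cons, String.append_assoc]

-- A's inner player scan, characterised by pvPairs
lemma pvInnerA (joueurs : List (List (String × List Int))) (x y : Int) :
    ∀ (t : String) (k : Int) (b : Bool),
    joueurs.foldl (fun (st : String × Int × Bool) joueur =>
        let pos := (PySem.Dict.mk joueur).getD "pos" []
        if x == PySem.List.pyGetD pos 0 0 && y == PySem.List.pyGetD pos 1 0 then
          (st.1 ++ " " ++ PySem.Int.toStr st.2.1 ++ " ", st.2.1 + 1, true)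
        else (st.1, st.2.1 + 1, st.2.2)) (t, k, b)
    = (t ++ PySem.Str.join "" (((pvPairs joueurs k).filter (fun p => p.1 == (x, y))).map
          (fun p => " " ++ PySem.Int.toStr p.2 ++ " ")),
       k + (joueurs.length : Int),
       b || !((pvPairs joueurs k).filter (fun p => p.1 == (x, y))).isEmpty) := by
  induction joueurs with
  | nil => intro t k b; simp [pvPairs, PySem.Str.join, PySem.Chars.join_nil]
  | cons j rest ih =>
      intro t k b
      simp only [List.foldl_cons, pvPairs]
      by_cases h1 : x = PySem.List.pyGetD ((PySem.Dict.mk j).getD "pos" []) 0 0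
      · by_cases h2 : y = PySem.List.pyGetD ((PySem.Dict.mk j).getD "pos" []) 1 0
        · rw [if_pos (by simp [← h1, ← h2]), ih,
            List.filter_cons_of_pos (by simp [← h1, ← h2])]
          simp [pvJoin0_cons, String.append_assoc, List.length_cons]
          omega
        · rw [if_neg (by simp [h2]), ih]
          rw [List.filter_cons_of_neg (by simp [Prod.ext_iff]; intro _; exact fun hc => h2 hc.symm)]
          simp [List.length_cons]; omega
      · rw [if_neg (by simp [h1]), ih]
        rw [List.filter_cons_of_neg (by simp [Prod.ext_iff]; intro hc; exact absurd hc.symm h1)]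
        simp [List.length_cons]; omega

-- the dict lookup is exactly the filtered pair list
lemma pvIndex_getD (joueurs : List (List (String × List Int))) (x y : Int) :
    (pvIndex joueurs).getD (x, y) []
      = (((pvPairs joueurs 1).filter (fun p => p.1 == (x, y))).map (fun p => p.2)) := by
  unfold pvIndex
  rw [PySem.Dict.getD_foldl_modify_append]
  simp

-- A's whole x-step equals appending B's cell
lemma pvCellA_eq (joueurs : List (List (String × List Int))) (x y : Int) (t : String) :
    (let st := joueurs.foldl (fun (st : String × Int × Bool) joueur =>
        let pos := (PySem.Dict.mk joueur).getD "pos" []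
        if x == PySem.List.pyGetD pos 0 0 && y == PySem.List.pyGetD pos 1 0 then
          (st.1 ++ " " ++ PySem.Int.toStr st.2.1 ++ " ", st.2.1 + 1, true)
        else (st.1, st.2.1 + 1, st.2.2)) (t, (1 : Int), false)
     if !st.2.2 then st.1 ++ " . " else st.1)
    = t ++ pvCell joueurs x y := by
  rw [pvInnerA]
  unfold pvCell
  rw [pvIndex_getD]
  cases hf : (pvPairs joueurs 1).filter (fun p => p.1 == (x, y)) with
  | nil => simp [PySem.Str.join, PySem.Chars.join_nil]
  | cons p r => simp [List.map_map]; rfl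

-- ===== VERDICT (by name: the statement is the Claim_ definition above) =====
theorem formater_damier_spec : Claim_equal_formater_damier := by
  intro joueurs murs _ _
  show formater_damier joueurs murs = formater_damier_alt joueurs murs
  unfold formater_damier formater_damier_alt
  have hcell : ∀ y : Int, (fun (temp : String) (x : Int) =>
      let st := joueurs.foldl (fun (st : String × Int × Bool) joueur =>
        let pos := (PySem.Dict.mk joueur).getD "pos" []
        if x == PySem.List.pyGetD pos 0 0 && y == PySem.List.pyGetD pos 1 0 then
          (st.1 ++ " " ++ PySem.Int.toStr st.2.1 ++ " ", st.2.1 + 1, true)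
        else (st.1, st.2.1 + 1, st.2.2)) (temp, (1 : Int), false)
      if !st.2.2 then st.1 ++ " . " else st.1)
      = fun temp x => temp ++ pvCell joueurs x y := by
    intro y; funext temp x; exact pvCellA_eq joueurs x y temp
  simp only [hcell, pvFoldl_join]
  have hrow : (fun (lignes : List String) (y : Int) =>
      lignes ++ [(PySem.Int.toStr y ++ " |" ++
          PySem.Str.join "" ((PySem.List.pyRange 1 10).map (fun x => pvCell joueurs x y))) ++ "|" ++ ""]
        ++ ["  |" ++ "                           " ++ "|"])
      = fun lignes y => lignes ++ [pvRow joueurs y, pvSpacer] := by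
    funext lignes y
    simp [pvRow, pvSpacer, String.append_assoc]
  rw [hrow]
  rw [PySem.List.foldl_append_eq_flatMap (fun y => [pvRow joueurs y, pvSpacer])]
  have hcols : (fun (resulat : String) (i : Int) => resulat ++ " " ++ PySem.Int.toStr i ++ " ")
      = fun (resulat : String) (i : Int) => resulat ++ (" " ++ PySem.Int.toStr i ++ " ") := by
    funext r i; simp [String.append_assoc]
  rw [hcols, pvFoldl_join]
  simp only [pvDashes, List.singleton_append, String.append_assoc]
  have e1 : (("   " ++ "---------------------------") :: List.flatMap (fun y => [pvRow joueurs y, pvSpacer]) (PySem.List.pyRange 9 0 (-1)))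
        ++ ["--|" ++ "---------------------------",
            "  |" ++ PySem.Str.join "" (List.map (fun i => " " ++ (PySem.Int.toStr i ++ " ")) (PySem.List.pyRange 1 10))]
      = (("   " ++ "---------------------------") :: (List.flatMap (fun y => [pvRow joueurs y, pvSpacer]) (PySem.List.pyRange 9 0 (-1)) ++ ["--|" ++ "---------------------------"]))
        ++ ["  |" ++ PySem.Str.join "" (List.map (fun i => " " ++ (PySem.Int.toStr i ++ " ")) (PySem.List.pyRange 1 10))] := by
    simp
  have e2 : ("   " ++ "---------------------------") :: (List.flatMap (fun y => [pvRow joueurs y, pvSpacer]) (PySem.List.pyRange 9 0 (-1)) ++ ["--|" ++ "---------------------------"])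
      = (("   " ++ "---------------------------") :: List.flatMap (fun y => [pvRow joueurs y, pvSpacer]) (PySem.List.pyRange 9 0 (-1)))
        ++ ["--|" ++ "---------------------------"] := by
    simp
  rw [e1, pvJoinNL_append, e2, pvJoinNL_append]
  simp [String.append_assoc]
  simp only [← String.append_assoc]
  congr 1
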